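-- pv_equiv track=rewrite | github.com/walids2003/Blobservation | blobservation.py | find_biggest_blobs
-- ===== SOURCE A (Python) =====
-- def find_biggest_blobs(modified_blob_list):#completed
--     biggest_blob_size = 0
--     result = []
--     for i in modified_blob_list:
--         if i['size'] > biggest_blob_size:
--             biggest_blob_size = i['size']
--     for i in modified_blob_list:
--         if i['size'] == biggest_blob_size:
--             result.append(i)
--     return result
-- ===== SOURCE B (Python) =====
-- def find_biggest_blobs(modified_blob_list):
--     # Single accumulate-and-reset pass instead of A's two sequential scans.
--     biggest_blob_size = 0
--     result = []
--     for blob in modified_blob_list: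
--         s = blob['size']
--         if s > biggest_blob_size:
--             biggest_blob_size = s
--             result = [blob]
--         elif s == biggest_blob_size:
--             result.append(blob)
--     return result
-- ===== Notes on version B (the rewrite author's own statement) =====
-- stated objective: alternative
-- what changed: B fuses A's two sequential scans (find max, then filter equal) into one accumulate-and-reset pass that resets the result list whenever a strictly larger size appears.
import Mathlib
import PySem

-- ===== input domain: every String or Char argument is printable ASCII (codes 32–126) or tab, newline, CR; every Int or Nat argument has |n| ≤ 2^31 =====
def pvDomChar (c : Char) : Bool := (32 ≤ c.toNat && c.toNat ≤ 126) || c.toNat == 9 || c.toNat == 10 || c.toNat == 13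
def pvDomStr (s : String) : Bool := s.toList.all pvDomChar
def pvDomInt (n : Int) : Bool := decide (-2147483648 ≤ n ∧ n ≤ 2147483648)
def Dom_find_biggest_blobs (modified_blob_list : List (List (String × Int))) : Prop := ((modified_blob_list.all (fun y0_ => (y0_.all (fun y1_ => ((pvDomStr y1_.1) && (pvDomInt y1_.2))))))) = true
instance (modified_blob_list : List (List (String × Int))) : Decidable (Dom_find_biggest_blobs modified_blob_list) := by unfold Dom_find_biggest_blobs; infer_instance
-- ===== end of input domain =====

-- B fuses A's two scans (max, then filter) into one accumulate-and-reset pass; return value only.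

-- ===== PORT A =====
-- i['size'] on the association list: first match; Pre_ guarantees the key is present,
-- so the getD default is never reached on admitted inputs (KeyError is excluded by Pre_).
def pvSize (b : List (String × Int)) : Int := (List.lookup "size" b).getD 0

def find_biggest_blobs (modified_blob_list : List (List (String × Int))) : List (List (String × Int)) :=
  let biggest_blob_size : Int :=
    modified_blob_list.foldl (fun acc i => if pvSize i > acc then pvSize i else acc) 0
  modified_blob_list.foldl
    (fun result i => if pvSize i = biggest_blob_size then result ++ [i] else result) []

-- ===== PORT B =====
def find_biggest_blobs_alt (modified_blob_list : List (List (String × Int))) : List (List (String × Int)) :=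
  (modified_blob_list.foldl
    (fun (st : Int × List (List (String × Int))) blob =>
      let s := pvSize blob
      if s > st.1 then (s, [blob])
      else if s = st.1 then (st.1, st.2 ++ [blob])
      else st)
    (0, [])).2

-- ===== PRECONDITION & SPEC =====
-- Pre_ excludes exactly the blobs missing a 'size' key, on which A raises KeyError.
def Pre_find_biggest_blobs (modified_blob_list : List (List (String × Int))) : Prop :=
  ∀ b ∈ modified_blob_list, (List.lookup "size" b).isSome
instance (modified_blob_list : List (List (String × Int))) : Decidable (Pre_find_biggest_blobs modified_blob_list) := by unfold Pre_find_biggest_blobs; infer_instance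
def pvWitness_find_biggest_blobs : (List (List (String × Int))) := [[("size", 2)], [("size", 1)], [("size", 2)]]
def Spec_find_biggest_blobs (modified_blob_list : List (List (String × Int))) (out : List (List (String × Int))) : Prop := out = find_biggest_blobs_alt modified_blob_list
instance (modified_blob_list : List (List (String × Int))) (out : List (List (String × Int))) : Decidable (Spec_find_biggest_blobs modified_blob_list out) := by unfold Spec_find_biggest_blobs; infer_instance

-- ===== CLAIM (what is proved, stated in full; the proofs are below) =====
def Claim_equal_find_biggest_blobs : Prop := ∀ (modified_blob_list : List (List (String × Int))), Dom_find_biggest_blobs modified_blob_list → Pre_find_biggest_blobs modified_blob_list → Spec_find_biggest_blobs modified_blob_list (find_biggest_blobs modified_blob_list)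

-- ===== LEMMAS AND PROOFS =====

-- A's first loop, started from m.
def pvMax (l : List (List (String × Int))) (m : Int) : Int :=
  l.foldl (fun acc i => if pvSize i > acc then pvSize i else acc) m

def pvStep (st : Int × List (List (String × Int))) (blob : List (String × Int)) :
    Int × List (List (String × Int)) :=
  let s := pvSize blob
  if s > st.1 then (s, [blob])
  else if s = st.1 then (st.1, st.2 ++ [blob])
  else st

lemma pvMax_ge (l : List (List (String × Int))) (m : Int) : m ≤ pvMax l m := by
  induction l generalizing m with
  | nil => simp [pvMax]
  | cons h t ih =>
    simp only [pvMax, List.foldl_cons]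
    by_cases hc : pvSize h > m
    · simp only [if_pos hc]
      exact le_trans (le_of_lt hc) (ih _)
    · simp only [if_neg hc]; exact ih m

-- Invariant of B's fold: final max is pvMax, and the result is r extended by the
-- equal-to-max elements (reset to just the suffix filter if the max strictly grew).
lemma pvFold_inv (l : List (List (String × Int))) (m : Int) (r : List (List (String × Int))) :
    l.foldl pvStep (m, r) =
      (pvMax l m,
       (if pvMax l m = m then r else []) ++ l.filter (fun b => pvSize b = pvMax l m)) := by
  induction l generalizing m r with
  | nil => simp [pvMax]
  | cons h t ih =>
    have hmax : pvMax (h :: t) m = pvMax t (if pvSize h > m then pvSize h else m) := by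
      simp [pvMax]
    by_cases hgt : pvSize h > m
    · -- head strictly raises the running max
      have hstep : pvStep (m, r) h = (pvSize h, [h]) := by
        simp [pvStep, hgt]
      rw [List.foldl_cons, hstep, ih]
      have hM : pvMax (h :: t) m = pvMax t (pvSize h) := by rw [hmax, if_pos hgt]
      have hge : pvSize h ≤ pvMax t (pvSize h) := pvMax_ge t _
      have hne' : ¬ pvMax t (pvSize h) = m := by omega
      rw [hM, if_neg hne', List.filter_cons]
      by_cases he : pvMax t (pvSize h) = pvSize h
      · have hh : decide (pvSize h = pvMax t (pvSize h)) = true := by simp [he]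
        rw [if_pos he, if_pos hh]
        simp
      · have hh : ¬ pvSize h = pvMax t (pvSize h) := fun hh => he hh.symm
        simp [he, hh]
    · -- head does not raise the max
      have hM : pvMax (h :: t) m = pvMax t m := by rw [hmax, if_neg hgt]
      by_cases heq : pvSize h = m
      · have hstep : pvStep (m, r) h = (m, r ++ [h]) := by
          simp [pvStep, heq]
        rw [List.foldl_cons, hstep, ih, hM]
        by_cases hfix : pvMax t m = m
        · have hh : pvSize h = pvMax t m := by rw [hfix, heq]
          simp [hfix, hh]
        · have hh : ¬ pvSize h = pvMax t m := by
            rw [heq]; intro hc; exact hfix hc.symm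
          simp [hfix, hh]
      · have hstep : pvStep (m, r) h = (m, r) := by
          simp [pvStep, hgt, heq]
        rw [List.foldl_cons, hstep, ih, hM]
        have hh : ¬ pvSize h = pvMax t m := by
          intro hc
          have := pvMax_ge t m
          omega
        simp [hh]

lemma a_eq_filter (l : List (List (String × Int))) :
    find_biggest_blobs l = l.filter (fun b => pvSize b = pvMax l 0) := by
  unfold find_biggest_blobs
  rw [PySem.List.foldl_append_ite_eq_filter]
  simp [pvMax]

-- ===== VERDICT (by name: the statement is the Claim_ definition above) =====
theorem find_biggest_blobs_spec : Claim_equal_find_biggest_blobs := by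
  intro l _ _
  unfold Spec_find_biggest_blobs
  have hB : find_biggest_blobs_alt l = (l.foldl pvStep (0, [])).2 := by
    unfold find_biggest_blobs_alt pvStep; rfl
  rw [a_eq_filter, hB, pvFold_inv]
  by_cases h0 : pvMax l 0 = 0 <;> simp [h0]
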